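-- pv_equiv track=rewrite | github.com/21661/Term_extraction | utils/candidate_tool.py | dedupe_keep_longest
-- ===== SOURCE A (Python) =====
-- from typing import List, Dict
--
-- def dedupe_keep_longest(candidates: List[str]) -> List[str]:
--     """去重保留最长词"""
--     seen_map: Dict[str, str] = {}
--     for t in candidates:
--         if not t.strip():
--             continue
--         key = t.lower().strip()
--         if key not in seen_map or len(t) > len(seen_map[key]):
--             seen_map[key] = t
--     return list(seen_map.values())
-- ===== SOURCE B (Python) =====
-- from typing import List, Dict
--
--
-- def _longest(group: List[str]) -> str:
--     # max returns the FIRST longest element, matching strict '>' replacement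
--     return max(group, key=len)
--
--
-- def dedupe_keep_longest(candidates: List[str]) -> List[str]:
--     """去重保留最长词 (group per key, then pick the first-longest of each group)"""
--     groups: Dict[str, List[str]] = {}
--     for t in candidates:
--         if not t.strip():
--             continue
--         groups.setdefault(t.lower().strip(), []).append(t)
--     return [_longest(g) for g in groups.values()]
-- ===== Notes on version B (the rewrite author's own statement) =====
-- stated objective: alternative
-- what changed: Replaces A's single-pass running-maximum dict update with a group-then-reduce: one pass collects per-key lists of originals in encounter order, then each group is reduced with max(key=len) (first longest).
import Mathlib
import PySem

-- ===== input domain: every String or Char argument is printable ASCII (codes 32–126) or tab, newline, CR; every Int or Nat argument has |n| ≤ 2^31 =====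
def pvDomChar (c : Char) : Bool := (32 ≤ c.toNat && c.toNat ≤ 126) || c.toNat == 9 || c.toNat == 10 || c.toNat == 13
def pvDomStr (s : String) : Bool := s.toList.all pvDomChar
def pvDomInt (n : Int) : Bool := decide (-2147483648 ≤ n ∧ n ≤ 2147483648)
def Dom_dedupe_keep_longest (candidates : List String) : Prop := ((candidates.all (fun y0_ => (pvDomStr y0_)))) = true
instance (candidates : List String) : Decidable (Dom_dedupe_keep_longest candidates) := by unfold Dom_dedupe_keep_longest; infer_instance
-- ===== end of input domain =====

-- B groups candidates per lowercased-stripped key and then reduces each group with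
-- max(key=len), instead of A's running-maximum dict update; return value equivalence only.


-- ===== PORT A =====
def dedupe_keep_longest (candidates : List String) : List String :=
  (candidates.foldl (fun seen t =>
      if PySem.Str.strip t == "" then seen
      else
        let key := PySem.Str.strip (PySem.Str.lower t)
        if !(seen.contains key) || decide (PySem.Str.len (seen.getD key "") < PySem.Str.len t)
        then seen.insert key t else seen)
    (PySem.Dict.empty : PySem.Dict String String)).values

-- ===== PORT B =====
-- _longest: max(group, key=len); the 'none' branch is Python's max-on-empty (never hit: groups are nonempty)
def pyLongest (g : List String) : String :=
  match PySem.List.max? g (fun s => PySem.Str.len s) with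
  | some m => m
  | none => ""

def dedupe_keep_longest_alt (candidates : List String) : List String :=
  let groups := candidates.foldl (fun d t =>
      if PySem.Str.strip t == "" then d
      else d.modify (PySem.Str.strip (PySem.Str.lower t)) [] (fun g => g ++ [t]))
    (PySem.Dict.empty : PySem.Dict String (List String))
  groups.values.map pyLongest

-- ===== PRECONDITION & SPEC =====
def Spec_dedupe_keep_longest (candidates : List String) (out : List String) : Prop := out = dedupe_keep_longest_alt candidates
instance (candidates : List String) (out : List String) : Decidable (Spec_dedupe_keep_longest candidates out) := by unfold Spec_dedupe_keep_longest; infer_instance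

-- ===== CLAIM (what is proved, stated in full; the proofs are below) =====
def Claim_equal_dedupe_keep_longest : Prop := ∀ (candidates : List String), Dom_dedupe_keep_longest candidates → Spec_dedupe_keep_longest candidates (dedupe_keep_longest candidates)

-- ===== LEMMAS AND PROOFS =====

-- the pair mapping a group entry to A's corresponding entry
def pvF (p : String × List String) : String × String := (p.1, pyLongest p.2)

lemma max?_append_singleton {α κ : Type} [LT κ] [DecidableLT κ] (g : List α) (t : α) (key : α → κ) :
    PySem.List.max? (g ++ [t]) key =
      match PySem.List.max? g key with
      | none => some t
      | some m => if key m < key t then some t else some m := by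
  simp only [PySem.List.max?, List.foldl_append, List.foldl_cons, List.foldl_nil]
  rfl

lemma pyLongest_append (g : List String) (t : String) (ht : 0 < PySem.Str.len t) :
    pyLongest (g ++ [t]) =
      if PySem.Str.len (pyLongest g) < PySem.Str.len t then t else pyLongest g := by
  unfold pyLongest
  rw [max?_append_singleton]
  cases hg : PySem.List.max? g (fun s => PySem.Str.len s) with
  | none =>
      simp only []
      rw [if_pos]
      simp [PySem.Str.len] at ht ⊢
      omega
  | some m =>
      simp only []
      split_ifs <;> simp

lemma get?_map_pvF (dB : PySem.Dict String (List String)) (k : String) :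
    (PySem.Dict.mk (dB.items.map pvF)).get? k = (dB.get? k).map pyLongest := by
  simp [PySem.Dict.get?, List.find?_map, Function.comp_def, pvF]

lemma contains_map_pvF (dB : PySem.Dict String (List String)) (k : String) :
    (PySem.Dict.mk (dB.items.map pvF)).contains k = dB.contains k := by
  simp [PySem.Dict.contains, List.any_map, Function.comp_def, pvF]

lemma main_invariant (l : List String) (dA : PySem.Dict String String)
    (dB : PySem.Dict String (List String))
    (hnd : dB.keys.Nodup)
    (H : dA.items = dB.items.map pvF) :
    (l.foldl (fun seen t =>
        if PySem.Str.strip t == "" then seen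
        else
          let key := PySem.Str.strip (PySem.Str.lower t)
          if !(seen.contains key) || decide (PySem.Str.len (seen.getD key "") < PySem.Str.len t)
          then seen.insert key t else seen) dA).items
      = (l.foldl (fun d t =>
          if PySem.Str.strip t == "" then d
          else d.modify (PySem.Str.strip (PySem.Str.lower t)) [] (fun g => g ++ [t])) dB).items.map pvF := by
  induction l generalizing dA dB with
  | nil => simpa using H
  | cons t rest ih =>
      simp only [List.foldl_cons]
      by_cases hblank : PySem.Str.strip t == ""
      · rw [if_pos hblank, if_pos hblank]; exact ih dA dB hnd H
      · rw [if_neg hblank, if_neg hblank]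
        have hAeq : dA = PySem.Dict.mk (dB.items.map pvF) := PySem.Dict.ext H
        have htne : t ≠ "" := by
          intro h; subst h; exact hblank (by decide)
        have ht : 0 < PySem.Str.len t := by
          simp only [PySem.Str.len]
          have : t.toList ≠ [] := fun h => htne (String.toList_eq_nil_iff.mp h)
          have := List.length_pos_of_ne_nil this
          omega
        have hcont : dA.contains (PySem.Str.strip (PySem.Str.lower t)) = dB.contains (PySem.Str.strip (PySem.Str.lower t)) := by
          rw [hAeq]; exact contains_map_pvF dB _
        by_cases hc : dB.contains (PySem.Str.strip (PySem.Str.lower t)) = true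
        · -- key already present: B appends to the group, A keeps or replaces
          obtain ⟨g, hg⟩ : ∃ g, dB.get? (PySem.Str.strip (PySem.Str.lower t)) = some g := by
            cases hgo : dB.get? (PySem.Str.strip (PySem.Str.lower t)) with
            | none => rw [PySem.Dict.get?_eq_none_iff_contains] at hgo; rw [hgo] at hc; cases hc
            | some g => exact ⟨g, rfl⟩
          have hgetB : dB.getD (PySem.Str.strip (PySem.Str.lower t)) [] = g := by
            simp [PySem.Dict.getD, hg]
          have hgetA : dA.getD (PySem.Str.strip (PySem.Str.lower t)) "" = pyLongest g := by
            rw [hAeq]; simp [PySem.Dict.getD, get?_map_pvF, hg]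
          have hstepB : (dB.modify (PySem.Str.strip (PySem.Str.lower t)) [] (fun g => g ++ [t]))
              = dB.insert (PySem.Str.strip (PySem.Str.lower t)) (g ++ [t]) := by
            simp [PySem.Dict.modify, hgetB]
          simp only [hcont, hc, hgetA, hstepB, Bool.not_true, Bool.false_or]
          by_cases hlt : PySem.Str.len (pyLongest g) < PySem.Str.len t
          · have hwin : pyLongest (g ++ [t]) = t := by
              rw [pyLongest_append g t ht, if_pos hlt]
            rw [if_pos (by simpa using hlt)]
            refine ih _ _ (PySem.Dict.nodup_keys_insert _ _ _ hnd) ?_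
            rw [PySem.Dict.items_insert_of_contains _ _ (hcont.trans hc),
                PySem.Dict.items_insert_of_contains _ _ hc, H, List.map_map, List.map_map]
            refine List.map_congr_left (fun p _ => ?_)
            by_cases hpk : p.1 = PySem.Str.strip (PySem.Str.lower t)
            · simp [pvF, hpk, hwin]
            · simp [pvF, hpk]
          · have hkeep : pyLongest (g ++ [t]) = pyLongest g := by
              rw [pyLongest_append g t ht, if_neg hlt]
            rw [if_neg (by simpa using hlt)]
            refine ih _ _ (PySem.Dict.nodup_keys_insert _ _ _ hnd) ?_
            rw [PySem.Dict.items_insert_of_contains _ _ hc, H, List.map_map]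
            refine List.map_congr_left (fun p hp => ?_)
            by_cases hpk : p.1 = PySem.Str.strip (PySem.Str.lower t)
            · have hpg : p.2 = g := by
                have hmem : (PySem.Str.strip (PySem.Str.lower t), p.2) ∈ dB.items := by
                  rw [← hpk]; exact hp
                have := PySem.Dict.get?_of_mem_items _ hmem hnd
                rw [hg] at this; exact (Option.some_inj.mp this).symm
              simp [pvF, hpk, hpg, hkeep]
            · simp [pvF, hpk]
        · -- fresh key: both sides append a new entry
          have hc' : dB.contains (PySem.Str.strip (PySem.Str.lower t)) = false := by
            simpa using hc
          have hstepB : (dB.modify (PySem.Str.strip (PySem.Str.lower t)) [] (fun g => g ++ [t]))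
              = dB.insert (PySem.Str.strip (PySem.Str.lower t)) [t] := by
            rw [PySem.Dict.modify, PySem.Dict.getD_of_not_contains _ _ hc']; rfl
          simp only [hcont, hc', Bool.not_false, Bool.true_or, if_pos, hstepB]
          refine ih _ _ (PySem.Dict.nodup_keys_insert _ _ _ hnd) ?_
          rw [PySem.Dict.items_insert_of_not_contains _ _ (hcont.trans hc'),
              PySem.Dict.items_insert_of_not_contains _ _ hc', H, List.map_append]
          rfl

theorem dedupe_keep_longest_spec : Claim_equal_dedupe_keep_longest := by
  intro candidates _
  unfold Spec_dedupe_keep_longest dedupe_keep_longest dedupe_keep_longest_alt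
  have h := main_invariant candidates PySem.Dict.empty PySem.Dict.empty (by simp [PySem.Dict.keys, PySem.Dict.empty]) (by simp [PySem.Dict.empty])
  simp only [PySem.Dict.values, h, List.map_map]
  rfl
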